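-- pv_equiv track=rewrite | github.com/pkang6689-pixel/pkang6689-pixel.github.io | fix_geometry_rubric.py | remove_rubric_container
-- ===== SOURCE A (Python) =====
-- def remove_rubric_container(content):
--     """Remove the entire <div class='rubric-container'>...</div> block by tracking div nesting."""
--     marker = '<div class="rubric-container">'
--     start = content.find(marker)
--     if start == -1:
--         return content
--
--     # Walk backwards to consume leading whitespace
--     ws_start = start
--     while ws_start > 0 and content[ws_start - 1] in ' \t\n\r':
--         ws_start -= 1
--
--     # Track nesting from the opening <div
--     depth = 0
--     i = start
--     while i < len(content):
--         if content[i:i+4] == '<div':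
--             depth += 1
--         elif content[i:i+6] == '</div>':
--             depth -= 1
--             if depth == 0:
--                 end = i + 6
--                 # Consume trailing whitespace/newline
--                 while end < len(content) and content[end] in ' \t\n\r':
--                     end += 1
--                 return content[:ws_start] + '\n' + content[end:]
--         i += 1
--     return content
-- ===== SOURCE B (Python) =====
-- def remove_rubric_container(content):
--     """Remove the rubric-container div block: hop between '</div>' occurrences and
--     recognise the block's end by comparing substring counts over the prefix slices."""
--     marker = '<div class="rubric-container">'
--     start = content.find(marker)
--     if start == -1:
--         return content
--     ws_start = len(content[:start].rstrip(' \t\n\r'))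
--     close = content.find('</div>', start)
--     while close != -1:
--         end = close + 6
--         if content[start:close].count('<div') == content[start:end].count('</div>'):
--             return content[:ws_start] + '\n' + content[end:].lstrip(' \t\n\r')
--         close = content.find('</div>', close + 1)
--     return content
-- ===== Notes on version B (the rewrite author's own statement) =====
-- stated objective: alternative
-- what changed: B keeps no depth counter and never scans character by character: it hops directly between close-tag occurrences with str.find and recognises the matching close as the first one where the open-tag-prefix count of the slice up to it equals the close-tag count of the slice through it, using rstrip/lstrip for the whitespace trimming instead of index walks.
import Mathlib
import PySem

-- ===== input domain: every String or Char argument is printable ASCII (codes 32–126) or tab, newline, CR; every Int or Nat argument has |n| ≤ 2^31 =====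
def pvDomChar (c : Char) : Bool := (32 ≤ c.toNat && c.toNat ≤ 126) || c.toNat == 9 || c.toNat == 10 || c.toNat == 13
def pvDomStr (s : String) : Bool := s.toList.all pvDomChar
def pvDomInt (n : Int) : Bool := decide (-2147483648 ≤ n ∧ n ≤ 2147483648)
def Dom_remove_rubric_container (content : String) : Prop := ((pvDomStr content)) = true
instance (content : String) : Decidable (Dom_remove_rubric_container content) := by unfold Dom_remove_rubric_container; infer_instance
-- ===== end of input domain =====

-- B replaces A's depth-counting character scan by hopping between '</div>' occurrences and
-- comparing '<div'/'</div>' substring counts on prefix slices (alternative algorithm, similar cost).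


-- ===== PORT A =====
-- membership test `c in ' \t\n\r'`
def pvIsWs (c : Char) : Bool := c == ' ' || c == '\t' || c == '\n' || c == '\r'

-- `while ws_start > 0 and content[ws_start - 1] in ' \t\n\r': ws_start -= 1`
-- (the index ws_start - 1 is always in range here, so plain getD is exact)
def pvWalkBack (cs : List Char) : Nat → Nat
  | 0 => 0
  | n + 1 => if pvIsWs (cs.getD n ' ') then pvWalkBack cs n else n + 1

-- `while end < len(content) and content[end] in ' \t\n\r': end += 1`, fuel = remaining length
def pvSkipWsGo (cs : List Char) : Nat → Nat → Nat
  | 0, e => e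
  | fuel + 1, e =>
    if h : e < cs.length then
      if pvIsWs cs[e] then pvSkipWsGo cs fuel (e + 1) else e
    else e

def pvSkipWs (cs : List Char) (e : Nat) : Nat := pvSkipWsGo cs (cs.length - e) e

-- A's scanning while-loop, fuel = remaining length (the loop advances i by exactly 1);
-- content[:ws_start] / content[end:] are take/drop (the indices are Nats here, exact)
def pvLoopAGo (cs : List Char) (ws : Nat) : Nat → Nat → Int → List Char
  | 0, _, _ => cs
  | fuel + 1, i, depth =>
    if _h : i < cs.length then
      if PySem.List.slice cs (some (i : Int)) (some ((i + 4 : Nat) : Int)) = "<div".toList then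
        pvLoopAGo cs ws fuel (i + 1) (depth + 1)
      else if PySem.List.slice cs (some (i : Int)) (some ((i + 6 : Nat) : Int)) = "</div>".toList then
        if depth - 1 = 0 then
          cs.take ws ++ '\n' :: cs.drop (pvSkipWs cs (i + 6))
        else pvLoopAGo cs ws fuel (i + 1) (depth - 1)
      else pvLoopAGo cs ws fuel (i + 1) depth
    else cs

def pvLoopA (cs : List Char) (ws : Nat) (i : Nat) (depth : Int) : List Char :=
  pvLoopAGo cs ws (cs.length - i) i depth

def remove_rubric_container (content : String) : String :=
  let cs := content.toList
  let start := PySem.Chars.find cs "<div class=\"rubric-container\">".toList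
  if start = -1 then content
  else String.ofList (pvLoopA cs (pvWalkBack cs start.toNat) start.toNat 0)

-- ===== PORT B =====
-- Source B's rstrip(' \t\n\r') / lstrip(' \t\n\r') with an explicit char set: exact, ported by hand
def pvRstripWs (l : List Char) : List Char := (l.reverse.dropWhile pvIsWs).reverse
def pvLstripWs (l : List Char) : List Char := l.dropWhile pvIsWs

-- Source B's `while close != -1:` loop: hop to the next '</div>' occurrence with find(·, close+1);
-- fuel = an ample iteration bound (each iteration moves close forward by at least one)
def pvLoopBGo (cs : List Char) (start ws : Nat) : Nat → Int → List Char
  | 0, _ => cs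
  | fuel + 1, close =>
    if close = -1 then cs
    else if PySem.Chars.count (PySem.List.slice cs (some (start : Int)) (some ((close.toNat : Nat) : Int))) "<div".toList
           = PySem.Chars.count (PySem.List.slice cs (some (start : Int)) (some ((close.toNat + 6 : Nat) : Int))) "</div>".toList
    then cs.take ws ++ '\n' :: pvLstripWs (cs.drop (close.toNat + 6))
    else pvLoopBGo cs start ws fuel (PySem.Chars.findFrom cs "</div>".toList ((close.toNat + 1 : Nat) : Int) none)

def remove_rubric_container_alt (content : String) : String :=
  let cs := content.toList
  let start := PySem.Chars.find cs "<div class=\"rubric-container\">".toList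
  if start = -1 then content
  else String.ofList (pvLoopBGo cs start.toNat (pvRstripWs (cs.take start.toNat)).length
        (cs.length + 1) (PySem.Chars.findFrom cs "</div>".toList start none))

-- ===== PRECONDITION & SPEC =====
def Spec_remove_rubric_container (content : String) (out : String) : Prop := out = remove_rubric_container_alt content
instance (content : String) (out : String) : Decidable (Spec_remove_rubric_container content out) := by unfold Spec_remove_rubric_container; infer_instance

-- ===== CLAIM (what is proved, stated in full; the proofs are below) =====
def Claim_equal_remove_rubric_container : Prop := ∀ (content : String), Dom_remove_rubric_container content → Spec_remove_rubric_container content (remove_rubric_container content)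

-- ===== LEMMAS AND PROOFS =====

-- positional occurrence count: number of p in [i, j) with pat a prefix of cs.drop p
def pvCnt (cs pat : List Char) (i j : Nat) : Nat :=
  if _h : i < j then (if pat.isPrefixOf (cs.drop i) then 1 else 0) + pvCnt cs pat (i + 1) j else 0
termination_by j - i

theorem pvCnt_stop (cs pat : List Char) (i j : Nat) (h : ¬ i < j) : pvCnt cs pat i j = 0 := by
  unfold pvCnt; rw [dif_neg h]

theorem pvCnt_step (cs pat : List Char) (i j : Nat) (h : i < j) :
    pvCnt cs pat i j = (if pat.isPrefixOf (cs.drop i) then 1 else 0) + pvCnt cs pat (i + 1) j := by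
  conv_lhs => unfold pvCnt
  rw [dif_pos h]

theorem pvCnt_split (cs pat : List Char) :
    ∀ n i j k, j - i ≤ n → i ≤ j → j ≤ k → pvCnt cs pat i k = pvCnt cs pat i j + pvCnt cs pat j k := by
  intro n
  induction n with
  | zero =>
    intro i j k h hij hjk
    rw [show j = i from by omega, pvCnt_stop _ _ i i (by omega), Nat.zero_add]
  | succ n ih =>
    intro i j k h hij hjk
    by_cases hlt : i < j
    · rw [pvCnt_step _ _ i k (by omega), pvCnt_step _ _ i j hlt,
          ih (i + 1) j k (by omega) (by omega) hjk]
      omega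
    · rw [show j = i from by omega, pvCnt_stop _ _ i i (by omega), Nat.zero_add]

theorem pvCnt_zero_of (cs pat : List Char) :
    ∀ n i j, j - i ≤ n → (∀ p, i ≤ p → p < j → ¬ pat <+: cs.drop p) → pvCnt cs pat i j = 0 := by
  intro n
  induction n with
  | zero =>
    intro i j h _
    exact pvCnt_stop _ _ _ _ (by omega)
  | succ n ih =>
    intro i j h hno
    by_cases hij : i < j
    · rw [pvCnt_step _ _ _ _ hij,
          if_neg (by simpa [List.isPrefixOf_iff_prefix] using hno i le_rfl hij),
          ih (i + 1) j (by omega) (fun p hp1 hp2 => hno p (by omega) hp2)]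
    · exact pvCnt_stop _ _ _ _ hij

-- shift/congruence: counts agree when the occurrence tests agree pointwise under an offset
theorem pvCnt_congr (l₁ l₂ pat : List Char) (m : Nat) :
    ∀ n i j, j - i ≤ n →
      (∀ p, i ≤ p → p < j → pat.isPrefixOf (l₁.drop p) = pat.isPrefixOf (l₂.drop (p + m))) →
      pvCnt l₁ pat i j = pvCnt l₂ pat (i + m) (j + m) := by
  intro n
  induction n with
  | zero =>
    intro i j h _
    rw [pvCnt_stop _ _ _ _ (by omega), pvCnt_stop _ _ _ _ (by omega)]
  | succ n ih =>
    intro i j h hpt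
    by_cases hij : i < j
    · rw [pvCnt_step l₁ pat i j hij, pvCnt_step l₂ pat (i + m) (j + m) (by omega)]
      rw [hpt i le_rfl hij, show i + m + 1 = i + 1 + m from by omega]
      rw [ih (i + 1) j (by omega) (fun p hp1 hp2 => hpt p (by omega) hp2)]
    · rw [pvCnt_stop _ _ _ _ hij, pvCnt_stop _ _ _ _ (by omega)]

-- a prefix pins the characters under it
theorem pvPrefix_get (l' pat : List Char) (k : Nat) (h : pat <+: l') (hk : k < pat.length) :
    l'[k]? = pat[k]? := by
  obtain ⟨r, rfl⟩ := h
  rw [List.getElem?_append_left hk]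

theorem pvOcc_get (cs pat : List Char) (c t : Nat) (h : pat <+: cs.drop c) (ht : t < pat.length) :
    cs[c + t]? = pat[t]? := by
  rw [← List.getElem?_drop]
  exact pvPrefix_get _ _ _ h ht

-- PySem.Chars.count counts exactly the occurrence positions, for a pattern whose occurrences
-- can never overlap (first char '<', no '<' later in the pattern)
theorem pvCount_go (pat : List Char) (hne : pat ≠ [])
    (hno : ∀ (l' : List Char) k, pat <+: l' → 0 < k → k < pat.length → ¬ pat <+: l'.drop k) :
    ∀ fuel (l : List Char) acc, l.length ≤ fuel →
      PySem.Chars.count.go pat fuel l acc = acc + pvCnt l pat 0 l.length := by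
  intro fuel
  induction fuel with
  | zero =>
    intro l acc h
    have : l = [] := List.eq_nil_of_length_eq_zero (by omega)
    subst this
    rw [PySem.Chars.count.go, pvCnt_stop _ _ _ _ (by omega)]
    omega
  | succ f ih =>
    intro l acc h
    cases l with
    | nil =>
      have hgo : PySem.Chars.count.go pat (f + 1) [] acc = acc := by
        rw [PySem.Chars.count.go]
        omega
      rw [hgo, pvCnt_stop _ _ _ _ (by simp)]
      omega
    | cons hd t =>
      rw [PySem.Chars.count.go]
      have hplen : 0 < pat.length := List.length_pos_of_ne_nil hne
      by_cases hpre : pat.isPrefixOf (hd :: t)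
      · rw [if_pos hpre]
        have hpre' : pat <+: (hd :: t) := List.isPrefixOf_iff_prefix.mp hpre
        have hpl : pat.length ≤ (hd :: t).length := hpre'.length_le
        rw [ih (List.drop pat.length (hd :: t)) (acc + 1) (by simp at h ⊢; omega)]
        have hsplit := pvCnt_split (hd :: t) pat (hd :: t).length 0 pat.length (hd :: t).length
          (by omega) (by omega) hpl
        have h1 : pvCnt (hd :: t) pat 0 pat.length = 1 := by
          rw [pvCnt_step _ _ _ _ hplen, List.drop_zero, if_pos hpre,
              pvCnt_zero_of (hd :: t) pat pat.length 1 pat.length (by omega)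
                (fun p hp1 hp2 => hno (hd :: t) p hpre' (by omega) hp2)]
        have h2 : pvCnt (hd :: t) pat pat.length (hd :: t).length
            = pvCnt (List.drop pat.length (hd :: t)) pat 0 (List.drop pat.length (hd :: t)).length := by
          have := pvCnt_congr (List.drop pat.length (hd :: t)) (hd :: t) pat pat.length
            ((hd :: t).length) 0 ((hd :: t).length - pat.length) (by omega)
            (fun p _ _ => by rw [List.drop_drop, Nat.add_comm pat.length p])
          rw [List.length_drop]
          rw [this, Nat.zero_add, show (hd :: t).length - pat.length + pat.length = (hd :: t).length from by omega]
        rw [hsplit, h1, h2]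
        omega
      · rw [if_neg hpre]
        rw [ih t acc (by simp at h; omega)]
        have h0 : pvCnt (hd :: t) pat 0 (hd :: t).length
            = pvCnt (hd :: t) pat 1 (hd :: t).length := by
          rw [pvCnt_step _ _ _ _ (by simp), List.drop_zero, if_neg hpre, Nat.zero_add]
        have h1 : pvCnt t pat 0 t.length = pvCnt (hd :: t) pat 1 (hd :: t).length := by
          have := pvCnt_congr t (hd :: t) pat 1 t.length 0 t.length (by omega)
            (fun p _ _ => by rw [List.drop_succ_cons])
          rw [this, Nat.zero_add, show t.length + 1 = (hd :: t).length from by simp]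
        rw [h0, ← h1]

theorem pvCount_eq (l pat : List Char) (hne : pat ≠ [])
    (hno : ∀ (l' : List Char) k, pat <+: l' → 0 < k → k < pat.length → ¬ pat <+: l'.drop k) :
    PySem.Chars.count l pat = pvCnt l pat 0 l.length := by
  unfold PySem.Chars.count
  rw [if_neg (by simpa using hne)]
  rw [pvCount_go pat hne hno l.length l 0 le_rfl, Nat.zero_add]

-- count on the prefix slice = positional count on cs, when no occurrence is cut by the right edge
theorem pvCountSlice (cs pat : List Char) (start e : Nat) (hne : pat ≠ [])
    (hno : ∀ (l' : List Char) k, pat <+: l' → 0 < k → k < pat.length → ¬ pat <+: l'.drop k)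
    (hs : start ≤ e) (hlen : e ≤ cs.length)
    (hb : ∀ p, e < p + pat.length → p < e → ¬ pat <+: cs.drop p) :
    PySem.Chars.count ((cs.drop start).take (e - start)) pat = pvCnt cs pat start e := by
  have hL : ((cs.drop start).take (e - start)).length = e - start := by
    simp
    omega
  rw [pvCount_eq _ pat hne hno, hL]
  have := pvCnt_congr ((cs.drop start).take (e - start)) cs pat start (e - start) 0 (e - start)
    (by omega)
    (fun p hp1 hp2 => by
      rw [List.drop_take, List.drop_drop]
      rw [Bool.eq_iff_iff, List.isPrefixOf_iff_prefix, List.isPrefixOf_iff_prefix]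
      rw [Nat.add_comm p start]
      by_cases hcut : p + pat.length ≤ e - start
      · rw [List.prefix_take_iff]
        exact ⟨fun hx => hx.1, fun hx => ⟨hx, by omega⟩⟩
      · constructor
        · intro hx
          have := hx.length_le
          simp at this
          omega
        · intro hx
          exact ((hb (start + p) (by omega) (by omega)) hx).elim
      )
  rw [this, Nat.zero_add, show e - start + start = e from by omega]

-- non-overlap for the two literal patterns
theorem pvNoOverlapO : ∀ (l' : List Char) k, "<div".toList <+: l' → 0 < k → k < ("<div".toList).length → ¬ "<div".toList <+: l'.drop k := by
  intro l' k h hk1 hk2 hbad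
  have h1 : l'[k]? = ("<div".toList)[k]? := pvPrefix_get l' _ k h (by simpa using hk2)
  have h2 : (l'.drop k)[0]? = ("<div".toList)[0]? := pvPrefix_get _ _ 0 hbad (by decide)
  rw [List.getElem?_drop, Nat.add_zero, h1] at h2
  have hk2' : k < 4 := by simpa using hk2
  interval_cases k <;> simp_all

theorem pvNoOverlapC : ∀ (l' : List Char) k, "</div>".toList <+: l' → 0 < k → k < ("</div>".toList).length → ¬ "</div>".toList <+: l'.drop k := by
  intro l' k h hk1 hk2 hbad
  have h1 : l'[k]? = ("</div>".toList)[k]? := pvPrefix_get l' _ k h (by simpa using hk2)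
  have h2 : (l'.drop k)[0]? = ("</div>".toList)[0]? := pvPrefix_get _ _ 0 hbad (by decide)
  rw [List.getElem?_drop, Nat.add_zero, h1] at h2
  have hk2' : k < 6 := by simpa using hk2
  interval_cases k <;> simp_all

-- around a '</div>' occurrence at c: no '<div' occurrence at c-3..c+5, no '</div>' at c+1..c+5
theorem pvClose_len (cs : List Char) (c : Nat) (h : "</div>".toList <+: cs.drop c) :
    c + 6 ≤ cs.length := by
  have := h.length_le
  simp at this
  omega

theorem pvNoOpenNear (cs : List Char) (c p : Nat) (hQ : "</div>".toList <+: cs.drop c)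
    (hp : c ≤ p + 3 ∧ p ≤ c + 5) : ¬ "<div".toList <+: cs.drop p := by
  intro hbad
  rcases Nat.lt_trichotomy p c with hlt | heq | hgt
  · have e1 := pvOcc_get cs _ p (c - p) hbad (by simp; omega)
    rw [show p + (c - p) = c from by omega] at e1
    have e2 := pvOcc_get cs _ c 0 hQ (by decide)
    rw [Nat.add_zero] at e2
    rw [e2] at e1
    have hck : c - p < 4 := by omega
    have hck1 : 1 ≤ c - p := by omega
    interval_cases h : (c - p) <;> simp_all
  · subst heq
    have e1 := pvOcc_get cs _ p 1 hbad (by decide)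
    have e2 := pvOcc_get cs _ p 1 hQ (by decide)
    rw [e2] at e1
    simp_all
  · have e1 := pvOcc_get cs _ p 0 hbad (by decide)
    rw [Nat.add_zero] at e1
    have e2 := pvOcc_get cs _ c (p - c) hQ (by simp; omega)
    rw [show c + (p - c) = p from by omega, e1] at e2
    have hck : p - c < 6 := by omega
    have hck1 : 1 ≤ p - c := by omega
    interval_cases h : (p - c) <;> simp_all

theorem pvNoCloseNear (cs : List Char) (c p : Nat) (hQ : "</div>".toList <+: cs.drop c)
    (hp : c < p ∧ p ≤ c + 5) : ¬ "</div>".toList <+: cs.drop p := by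
  intro hbad
  have e1 := pvOcc_get cs _ p 0 hbad (by decide)
  rw [Nat.add_zero] at e1
  have e2 := pvOcc_get cs _ c (p - c) hQ (by simp; omega)
  rw [show c + (p - c) = p from by omega, e1] at e2
  have hck : p - c < 6 := by omega
  have hck1 : 1 ≤ p - c := by omega
  interval_cases h : (p - c) <;> simp_all

-- bridge: A's slice test is the prefix test
theorem pvSlice_eq (cs : List Char) (i k : Nat) :
    PySem.List.slice cs (some (i : Int)) (some ((i + k : Nat) : Int)) = (cs.drop i).take k := by
  rw [PySem.List.slice_natCast]; congr 1; omega

theorem pvSliceNat (cs : List Char) (a b : Nat) :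
    PySem.List.slice cs (some (a : Int)) (some (b : Int)) = (cs.drop a).take (b - a) := by
  rw [PySem.List.slice_natCast]

theorem pvSlice_test (cs pat : List Char) (i : Nat) :
    (PySem.List.slice cs (some (i : Int)) (some ((i + pat.length : Nat) : Int)) = pat) ↔ pat <+: cs.drop i := by
  rw [pvSlice_eq, List.prefix_iff_eq_take]; exact eq_comm

-- A-loop basic steps
theorem pvLoopA_stop (cs : List Char) (ws i : Nat) (d : Int) (hi : ¬ i < cs.length) :
    pvLoopA cs ws i d = cs := by
  unfold pvLoopA
  rw [show cs.length - i = 0 from by omega]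
  rfl

theorem pvLoopA_step (cs : List Char) (ws i : Nat) (d : Int) (hi : i < cs.length) :
    pvLoopA cs ws i d =
      if PySem.List.slice cs (some (i : Int)) (some ((i + 4 : Nat) : Int)) = "<div".toList then
        pvLoopA cs ws (i + 1) (d + 1)
      else if PySem.List.slice cs (some (i : Int)) (some ((i + 6 : Nat) : Int)) = "</div>".toList then
        if d - 1 = 0 then
          cs.take ws ++ '\n' :: cs.drop (pvSkipWs cs (i + 6))
        else pvLoopA cs ws (i + 1) (d - 1)
      else pvLoopA cs ws (i + 1) d := by
  unfold pvLoopA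
  rw [show cs.length - i = (cs.length - (i + 1)) + 1 from by omega]
  rw [pvLoopAGo, dif_pos hi]

-- A's loop skips a position whose character is not '<'
theorem pvLoopA_skip (cs : List Char) (ws : Nat) (i : Nat) (d : Int)
    (hi : i < cs.length) (hc : cs[i]? ≠ some '<') :
    pvLoopA cs ws i d = pvLoopA cs ws (i + 1) d := by
  have hne : cs[i] ≠ '<' := by
    intro e; exact hc (by rw [List.getElem?_eq_getElem hi, e])
  have hdrop : cs.drop i = cs[i] :: cs.drop (i + 1) := List.drop_eq_getElem_cons hi
  rw [pvLoopA_step cs ws i d hi]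
  have h4 : PySem.List.slice cs (some (i : Int)) (some ((i + 4 : Nat) : Int)) ≠ "<div".toList := by
    rw [pvSlice_eq, hdrop]
    intro h'
    have hh := congrArg List.head? h'
    simp at hh
    have hv : (List.take 4 (List.drop i cs)).head? = some cs[i] := by rw [hdrop]; simp [List.head?_take]
    exact hne (Option.some_inj.mp (hv.symm.trans hh))
  have h6 : PySem.List.slice cs (some (i : Int)) (some ((i + 6 : Nat) : Int)) ≠ "</div>".toList := by
    rw [pvSlice_eq, hdrop]
    intro h'
    have hh := congrArg List.head? h'
    simp at hh
    have hv : (List.take 6 (List.drop i cs)).head? = some cs[i] := by rw [hdrop]; simp [List.head?_take]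
    exact hne (Option.some_inj.mp (hv.symm.trans hh))
  rw [if_neg h4, if_neg h6]

theorem pvLen4 : ("<div".toList).length = 4 := by decide
theorem pvLen6 : ("</div>".toList).length = 6 := by decide

theorem pvSlice_testO (cs : List Char) (i : Nat) :
    (PySem.List.slice cs (some (i : Int)) (some ((i + 4 : Nat) : Int)) = "<div".toList) ↔ "<div".toList <+: cs.drop i := by
  have h := pvSlice_test cs "<div".toList i
  rw [pvLen4] at h
  exact h

theorem pvSlice_testC (cs : List Char) (i : Nat) :
    (PySem.List.slice cs (some (i : Int)) (some ((i + 6 : Nat) : Int)) = "</div>".toList) ↔ "</div>".toList <+: cs.drop i := by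
  have h := pvSlice_test cs "</div>".toList i
  rw [pvLen6] at h
  exact h

-- A's loop returns cs when there is no '</div>' occurrence at or after i
theorem pvLoopA_no_close (cs : List Char) (ws : Nat) :
    ∀ n i d, cs.length - i ≤ n → (∀ p, i ≤ p → ¬ "</div>".toList <+: cs.drop p) →
      pvLoopA cs ws i d = cs := by
  intro n
  induction n with
  | zero =>
    intro i d h _
    exact pvLoopA_stop cs ws i d (by omega)
  | succ n ih =>
    intro i d h hno
    by_cases hi : i < cs.length
    · rw [pvLoopA_step cs ws i d hi]
      have hc : ¬ (PySem.List.slice cs (some (i : Int)) (some ((i + 6 : Nat) : Int)) = "</div>".toList) := by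
        rw [pvSlice_testC]; exact hno i le_rfl
      rw [if_neg hc]
      have hrest : ∀ p, i + 1 ≤ p → ¬ "</div>".toList <+: cs.drop p := fun p hp => hno p (by omega)
      by_cases ho : PySem.List.slice cs (some (i : Int)) (some ((i + 4 : Nat) : Int)) = "<div".toList
      · rw [if_pos ho]; exact ih (i + 1) (d + 1) (by omega) hrest
      · rw [if_neg ho]; exact ih (i + 1) d (by omega) hrest
    · exact pvLoopA_stop cs ws i d hi

-- A's loop walks from j to the first close cn, accumulating the '<div' occurrences into depth
theorem pvLoopA_to_close (cs : List Char) (ws : Nat) :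
    ∀ n j cn d, cn - j ≤ n → j ≤ cn → cn ≤ cs.length →
      (∀ p, j ≤ p → p < cn → ¬ "</div>".toList <+: cs.drop p) →
      pvLoopA cs ws j d = pvLoopA cs ws cn (d + (pvCnt cs "<div".toList j cn : Int)) := by
  intro n
  induction n with
  | zero =>
    intro j cn d h hle _ _
    rw [show cn = j from by omega, pvCnt_stop _ _ _ _ (by omega)]
    simp
  | succ n ih =>
    intro j cn d h hle hlen hno
    by_cases hj : j < cn
    · have hjl : j < cs.length := by omega
      rw [pvLoopA_step cs ws j d hjl]
      have hcF : ¬ (PySem.List.slice cs (some (j : Int)) (some ((j + 6 : Nat) : Int)) = "</div>".toList) := by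
        rw [pvSlice_testC]; exact hno j le_rfl hj
      rw [if_neg hcF]
      have hrest : ∀ p, j + 1 ≤ p → p < cn → ¬ "</div>".toList <+: cs.drop p :=
        fun p hp1 hp2 => hno p (by omega) hp2
      by_cases ho : PySem.List.slice cs (some (j : Int)) (some ((j + 4 : Nat) : Int)) = "<div".toList
      · rw [if_pos ho, ih (j + 1) cn (d + 1) (by omega) (by omega) hlen hrest]
        have hcnt : pvCnt cs "<div".toList j cn = 1 + pvCnt cs "<div".toList (j + 1) cn := by
          rw [pvCnt_step _ _ _ _ hj,
              if_pos (by rw [List.isPrefixOf_iff_prefix]; exact (pvSlice_testO cs j).mp ho)]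
        rw [hcnt]
        congr 1
        push_cast
        ring
      · rw [if_neg ho, ih (j + 1) cn d (by omega) (by omega) hlen hrest]
        have hcnt : pvCnt cs "<div".toList j cn = pvCnt cs "<div".toList (j + 1) cn := by
          rw [pvCnt_step _ _ _ _ hj,
              if_neg (by rw [List.isPrefixOf_iff_prefix]; rw [pvSlice_testO] at ho; exact ho)]
          omega
        rw [hcnt]
    · rw [show cn = j from by omega, pvCnt_stop _ _ _ _ (by omega)]
      simp

-- the trailing-whitespace walk is lstrip
theorem pvSkipWs_eq (cs : List Char) :
    ∀ n e, cs.length - e ≤ n → cs.drop (pvSkipWsGo cs (cs.length - e) e) = pvLstripWs (cs.drop e) := by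
  intro n
  induction n with
  | zero =>
    intro e h
    have he : cs.length ≤ e := by omega
    rw [show cs.length - e = 0 from by omega]
    simp [pvSkipWsGo, pvLstripWs, List.drop_eq_nil_of_le he]
  | succ n ih =>
    intro e h
    by_cases he : e < cs.length
    · rw [show cs.length - e = (cs.length - (e + 1)) + 1 from by omega]
      rw [pvSkipWsGo, dif_pos he]
      have hdrop : cs.drop e = cs[e] :: cs.drop (e + 1) := List.drop_eq_getElem_cons he
      by_cases hw : pvIsWs cs[e]
      · rw [if_pos hw, ih (e + 1) (by omega)]
        unfold pvLstripWs
        rw [hdrop, List.dropWhile_cons_of_pos hw]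
      · rw [if_neg hw]
        unfold pvLstripWs
        rw [hdrop, List.dropWhile_cons_of_neg (by simpa using hw), ← hdrop]
    · rw [show cs.length - e = 0 from by omega]
      simp [pvSkipWsGo, pvLstripWs, List.drop_eq_nil_of_le (by omega : cs.length ≤ e)]

-- the backward-whitespace walk computes the length of Source B's rstrip of the prefix
theorem pvWalkBack_eq_rstrip (cs : List Char) :
    ∀ s : Nat, s ≤ cs.length → pvWalkBack cs s = (pvRstripWs (cs.take s)).length := by
  intro s
  induction s with
  | zero => intro _; rfl
  | succ n ih =>
    intro hs
    have hn : n < cs.length := by omega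
    have htk : cs.take (n + 1) = cs.take n ++ [cs[n]] := by
      rw [List.take_add_one, List.getElem?_eq_getElem hn]; rfl
    have hget : cs.getD n ' ' = cs[n] := List.getD_eq_getElem cs ' ' hn
    rw [pvWalkBack, hget]
    unfold pvRstripWs
    by_cases hws : pvIsWs cs[n]
    · rw [if_pos hws, htk, List.reverse_append, List.reverse_singleton, List.singleton_append,
          List.dropWhile_cons_of_pos hws, ih (by omega)]
      rfl
    · rw [if_neg hws, htk, List.reverse_append, List.reverse_singleton, List.singleton_append,
          List.dropWhile_cons_of_neg (by simpa using hws)]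
      simp
      omega

-- findFrom characterizations
theorem pvFindFrom_neg (cs pat : List Char) (k : Nat) (hk : k ≤ cs.length) :
    PySem.Chars.findFrom cs pat (k : Int) none = -1 ↔ ∀ p, k ≤ p → ¬ pat <+: cs.drop p := by
  rw [PySem.Chars.findFrom_natCast_eq_neg_one_iff cs pat k hk]
  have hinf : pat <:+: (cs.drop k) ↔ ∃ j, pat <+: (cs.drop k).drop j := by
    rw [← PySem.Chars.isIn_iff_infix, ← PySem.Chars.exists_prefix_drop_iff_isIn]
  constructor
  · intro hni p hp hbad
    exact hni (hinf.mpr ⟨p - k, by rwa [List.drop_drop, show k + (p - k) = p from by omega]⟩)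
  · intro hall hbad
    obtain ⟨j, hj⟩ := hinf.mp hbad
    rw [List.drop_drop] at hj
    exact hall (k + j) (by omega) hj

theorem pvFindFrom_congr (cs pat : List Char) (k1 k2 : Nat) (h12 : k1 ≤ k2) (h2 : k2 ≤ cs.length)
    (hno : ∀ p, k1 ≤ p → p < k2 → ¬ pat <+: cs.drop p) :
    PySem.Chars.findFrom cs pat (k1 : Int) none = PySem.Chars.findFrom cs pat (k2 : Int) none := by
  have h1 : k1 ≤ cs.length := by omega
  by_cases hF2 : PySem.Chars.findFrom cs pat (k2 : Int) none = -1
  · rw [hF2, pvFindFrom_neg cs pat k1 h1]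
    have h2 := (pvFindFrom_neg cs pat k2 h2).mp hF2
    intro p hp
    by_cases hpk : p < k2
    · exact hno p hp hpk
    · exact h2 p (by omega)
  · obtain ⟨hge2, hocc2, hmin2⟩ := PySem.Chars.findFrom_natCast_spec cs pat k2 h2 hF2
    set r := PySem.Chars.findFrom cs pat (k2 : Int) none with hr
    have hrnn : 0 ≤ r := by omega
    have hF1 : PySem.Chars.findFrom cs pat (k1 : Int) none ≠ -1 := by
      rw [Ne, pvFindFrom_neg cs pat k1 h1]
      push Not
      exact ⟨r.toNat, by omega, hocc2⟩
    obtain ⟨hge1, hocc1, hmin1⟩ := PySem.Chars.findFrom_natCast_spec cs pat k1 h1 hF1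
    set r1 := PySem.Chars.findFrom cs pat (k1 : Int) none with hr1
    have hrnn1 : 0 ≤ r1 := by omega
    have hle : r1.toNat ≤ r.toNat := by
      by_contra hcon
      exact hmin1 r.toNat (by omega) (by omega) hocc2
    have hge : r.toNat ≤ r1.toNat := by
      by_contra hcon
      by_cases hk2r : k2 ≤ r1.toNat
      · exact hmin2 r1.toNat hk2r (by omega) hocc1
      · exact hno r1.toNat (by omega) (by omega) hocc1
    omega

-- the main correspondence: A's scan from j = B's close-hopping from j
theorem pvMain (cs : List Char) (ws start : Nat) :
    ∀ n j d fuel, start ≤ j → j ≤ cs.length → cs.length - j ≤ n → cs.length + 1 - j ≤ fuel →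
      d = (pvCnt cs "<div".toList start j : Int) - (pvCnt cs "</div>".toList start j : Int) →
      pvLoopA cs ws j d = pvLoopBGo cs start ws fuel (PySem.Chars.findFrom cs "</div>".toList (j : Int) none) := by
  intro n
  induction n with
  | zero =>
    intro j d fuel hsj hjlen hn hfuel hd
    by_cases hF : PySem.Chars.findFrom cs "</div>".toList (j : Int) none = -1
    · obtain ⟨f, rfl⟩ : ∃ f, fuel = f + 1 := ⟨fuel - 1, by omega⟩
      rw [hF, pvLoopBGo, if_pos rfl]
      exact pvLoopA_no_close cs ws cs.length j d (by omega) ((pvFindFrom_neg cs _ j hjlen).mp hF)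
    · obtain ⟨hger, hocc, hmin⟩ := PySem.Chars.findFrom_natCast_spec cs "</div>".toList j hjlen hF
      have hclen := pvClose_len cs _ hocc
      have hjcn : j ≤ (PySem.Chars.findFrom cs "</div>".toList (j : Int) none).toNat := by omega
      omega
  | succ n ih =>
    intro j d fuel hsj hjlen hn hfuel hd
    by_cases hF : PySem.Chars.findFrom cs "</div>".toList (j : Int) none = -1
    · obtain ⟨f, rfl⟩ : ∃ f, fuel = f + 1 := ⟨fuel - 1, by omega⟩
      rw [hF, pvLoopBGo, if_pos rfl]
      exact pvLoopA_no_close cs ws cs.length j d (by omega) ((pvFindFrom_neg cs _ j hjlen).mp hF)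
    · obtain ⟨hger, hocc, hmin⟩ := PySem.Chars.findFrom_natCast_spec cs "</div>".toList j hjlen hF
      generalize hFv : PySem.Chars.findFrom cs "</div>".toList (j : Int) none = F at *
      obtain ⟨cn, hcn⟩ : ∃ cn : Nat, F.toNat = cn := ⟨F.toNat, rfl⟩
      rw [hcn] at hocc hmin
      have hFnn : 0 ≤ F := le_trans (Int.natCast_nonneg j) hger
      have hjcn : j ≤ cn := by omega
      have hclen : cn + 6 ≤ cs.length := pvClose_len cs cn hocc
      -- A: walk to the close, then take the close branch
      rw [pvLoopA_to_close cs ws (cn - j) j cn d (by omega) hjcn (by omega) hmin]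
      rw [pvLoopA_step cs ws cn _ (by omega)]
      rw [if_neg (by rw [pvSlice_testO]; exact pvNoOpenNear cs cn cn hocc ⟨by omega, by omega⟩)]
      rw [if_pos ((pvSlice_testC cs cn).mpr hocc)]
      -- B: unfold one loop iteration
      obtain ⟨f, rfl⟩ : ∃ f, fuel = f + 1 := ⟨fuel - 1, by omega⟩
      rw [pvLoopBGo, if_neg hF, hcn]
      -- the two slice counts are positional counts
      have hOc : PySem.Chars.count (PySem.List.slice cs (some (start : Int)) (some ((cn : Nat) : Int))) "<div".toList
          = pvCnt cs "<div".toList start cn := by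
        rw [pvSliceNat]
        exact pvCountSlice cs "<div".toList start cn (by decide) pvNoOverlapO (by omega) (by omega)
          (fun p hp1 hp2 => pvNoOpenNear cs cn p hocc ⟨by rw [pvLen4] at hp1; omega, by omega⟩)
      have hCc : PySem.Chars.count (PySem.List.slice cs (some (start : Int)) (some ((cn + 6 : Nat) : Int))) "</div>".toList
          = pvCnt cs "</div>".toList start (cn + 6) := by
        rw [pvSliceNat]
        exact pvCountSlice cs "</div>".toList start (cn + 6) (by decide) pvNoOverlapC (by omega) (by omega)
          (fun p hp1 hp2 => pvNoCloseNear cs cn p hocc ⟨by rw [pvLen6] at hp1; omega, by omega⟩)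
      -- count bookkeeping
      have hsO : pvCnt cs "<div".toList start cn
          = pvCnt cs "<div".toList start j + pvCnt cs "<div".toList j cn :=
        pvCnt_split cs _ cn start j cn (by omega) hsj hjcn
      have hsC1 : pvCnt cs "</div>".toList start cn = pvCnt cs "</div>".toList start j := by
        rw [pvCnt_split cs _ cn start j cn (by omega) hsj hjcn,
            pvCnt_zero_of cs _ cn j cn (by omega) hmin]
        omega
      have h1 : pvCnt cs "</div>".toList cn (cn + 6) = 1 := by
        rw [pvCnt_step _ _ _ _ (by omega), if_pos (List.isPrefixOf_iff_prefix.mpr hocc),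
            pvCnt_zero_of cs _ 5 (cn + 1) (cn + 6) (by omega)
              (fun p hp1 hp2 => pvNoCloseNear cs cn p hocc ⟨by omega, by omega⟩)]
      have hsC2 : pvCnt cs "</div>".toList start (cn + 6) = pvCnt cs "</div>".toList start j + 1 := by
        rw [pvCnt_split cs _ (cn + 6) start cn (cn + 6) (by omega) (by omega) (by omega), hsC1, h1]
      have hO6 : pvCnt cs "<div".toList start (cn + 6) = pvCnt cs "<div".toList start cn := by
        rw [pvCnt_split cs _ (cn + 6) start cn (cn + 6) (by omega) (by omega) (by omega),
            pvCnt_zero_of cs _ 6 cn (cn + 6) (by omega)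
              (fun p hp1 hp2 => pvNoOpenNear cs cn p hocc ⟨by omega, by omega⟩)]
        omega
      by_cases hcond : pvCnt cs "<div".toList start cn = pvCnt cs "</div>".toList start (cn + 6)
      · rw [if_pos (show d + (pvCnt cs "<div".toList j cn : Int) - 1 = 0 by omega),
            if_pos (by rw [hOc, hCc]; exact hcond)]
        rw [show cs.drop (pvSkipWs cs (cn + 6)) = pvLstripWs (cs.drop (cn + 6)) from
              pvSkipWs_eq cs cs.length (cn + 6) (by omega)]
      · rw [if_neg (show ¬ d + (pvCnt cs "<div".toList j cn : Int) - 1 = 0 by omega),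
            if_neg (by rw [hOc, hCc]; exact hcond)]
        -- A: skip over the 5 remaining characters of '</div>'
        have skip : ∀ k : Nat, k ≤ 5 →
            pvLoopA cs ws (cn + 1) (d + (pvCnt cs "<div".toList j cn : Int) - 1)
              = pvLoopA cs ws (cn + 1 + k) (d + (pvCnt cs "<div".toList j cn : Int) - 1) := by
          intro k hk
          induction k with
          | zero => rfl
          | succ m ihm =>
            rw [ihm (by omega)]
            have hm : m < 5 := by omega
            have hc := pvOcc_get cs _ cn (m + 1) hocc (by rw [pvLen6]; omega)
            have hne : cs[cn + (m + 1)]? ≠ some '<' := by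
              rw [hc]; interval_cases m <;> decide
            have := pvLoopA_skip cs ws (cn + (m + 1)) (d + (pvCnt cs "<div".toList j cn : Int) - 1)
              (by omega) hne
            rw [show cn + 1 + m = cn + (m + 1) from by omega, this]
            congr 1
            omega
        rw [skip 5 (by omega), show cn + 1 + 5 = cn + 6 from by omega]
        rw [pvFindFrom_congr cs "</div>".toList (cn + 1) (cn + 6) (by omega) (by omega)
              (fun p hp1 hp2 => pvNoCloseNear cs cn p hocc ⟨by omega, by omega⟩)]
        exact ih (cn + 6) _ f (by omega) (by omega) (by omega) (by omega)
          (by rw [hO6, hsO, hsC2]; omega)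

-- ===== VERDICT (by name: the statement is the Claim_ definition above) =====
theorem remove_rubric_container_spec : Claim_equal_remove_rubric_container := by
  intro content hdom
  unfold Spec_remove_rubric_container remove_rubric_container remove_rubric_container_alt
  simp only []
  by_cases hfind : PySem.Chars.find content.toList "<div class=\"rubric-container\">".toList = -1
  · rw [if_pos hfind, if_pos hfind]
  · rw [if_neg hfind, if_neg hfind]
    set cs := content.toList
    set f := PySem.Chars.find cs "<div class=\"rubric-container\">".toList with hf
    have hnn : 0 ≤ f := by
      have := PySem.Chars.neg_one_le_find cs "<div class=\"rubric-container\">".toList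
      rw [← hf] at this; omega
    have hle : f.toNat ≤ cs.length := by
      have := PySem.Chars.find_le_length cs "<div class=\"rubric-container\">".toList
      rw [← hf] at this; omega
    have hcast : f = ((f.toNat : Nat) : Int) := by omega
    rw [pvWalkBack_eq_rstrip cs f.toNat hle]
    rw [show PySem.Chars.findFrom cs "</div>".toList f none
          = PySem.Chars.findFrom cs "</div>".toList ((f.toNat : Nat) : Int) none from by rw [← hcast]]
    rw [← pvMain cs (pvRstripWs (cs.take f.toNat)).length f.toNat cs.length f.toNat 0 (cs.length + 1)
          le_rfl hle (by omega) (by omega)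
          (by rw [pvCnt_stop _ _ _ _ (by omega), pvCnt_stop _ _ _ _ (by omega)]; simp)]
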